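-- pv_equiv track=rewrite | github.com/dawidbrzozowski/med-tane | algorithms/tane.py | generate_prefix_block
-- ===== SOURCE A (Python) =====
-- def generate_prefix_block(level):
--     prefix_block = []
--     for i in range(len(level)):
--         for j in range(i + 1, len(level)):
--             attr1 = level[i]
--             attr2 = level[j]
--             if attr1 != attr2 and attr1[0:-1] == attr2[0:-1]:
--                 prefix_block.append((attr1, attr2))
--
--     return prefix_block
-- ===== SOURCE B (Python) =====
-- def generate_prefix_block(level):
--     # One backward pass with a hash map from prefix to the entries that occur
--     # later in `level` (in original order), instead of A's nested index scans.
--     later = {}      # prefix tuple -> entries occurring later, in original order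
--     blocks = []
--     for attr in reversed(level):
--         key = tuple(attr[:-1])
--         bucket = later.get(key, [])
--         blocks.append([(attr, b) for b in bucket if b != attr])
--         later[key] = [attr] + bucket
--     blocks.reverse()
--     return [pair for block in blocks for pair in block]
-- ===== Notes on version B (the rewrite author's own statement) =====
-- stated objective: faster
-- what changed: Replaces the nested all-pairs index scan by a single backward pass that buckets entries in a dict keyed by their prefix tuple, so each entry is only paired with later entries of its own bucket.
import Mathlib
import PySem

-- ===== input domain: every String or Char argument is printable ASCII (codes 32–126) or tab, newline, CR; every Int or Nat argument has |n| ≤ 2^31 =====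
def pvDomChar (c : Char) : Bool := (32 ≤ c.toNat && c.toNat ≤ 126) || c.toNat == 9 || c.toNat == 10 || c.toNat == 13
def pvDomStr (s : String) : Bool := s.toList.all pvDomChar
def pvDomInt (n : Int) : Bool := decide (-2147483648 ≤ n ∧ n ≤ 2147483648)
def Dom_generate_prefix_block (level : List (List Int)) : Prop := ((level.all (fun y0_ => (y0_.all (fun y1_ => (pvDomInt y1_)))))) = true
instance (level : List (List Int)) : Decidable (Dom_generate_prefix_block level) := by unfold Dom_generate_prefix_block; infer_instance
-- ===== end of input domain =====

-- B replaces A's nested all-pairs index scans by one backward pass that buckets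
-- entries in a dict keyed by their prefix (objective: faster).


-- ===== PORT A =====
-- level[i] / level[j] are always in range inside the loops, so pyGetD is exact here.
def generate_prefix_block (level : List (List Int)) : List (List Int × List Int) :=
  (PySem.List.pyRange 0 (PySem.List.len level)).foldl (fun acc i =>
    (PySem.List.pyRange (i + 1) (PySem.List.len level)).foldl (fun acc j =>
      let attr1 := PySem.List.pyGetD level i []
      let attr2 := PySem.List.pyGetD level j []
      if attr1 ≠ attr2 ∧ PySem.List.slice attr1 (some 0) (some (-1)) = PySem.List.slice attr2 (some 0) (some (-1))
      then acc ++ [(attr1, attr2)] else acc) acc) []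

-- ===== PORT B =====
def generate_prefix_block_alt (level : List (List Int)) : List (List Int × List Int) :=
  let st := level.reverse.foldl
    (fun (s : PySem.Dict (List Int) (List (List Int)) × List (List (List Int × List Int))) attr =>
      let key := PySem.List.slice attr none (some (-1))
      let bucket := s.1.getD key []
      (s.1.insert key (attr :: bucket),
       s.2 ++ [(bucket.filter (fun b => decide (b ≠ attr))).map (fun b => (attr, b))]))
    (PySem.Dict.empty, [])
  st.2.reverse.flatten

-- ===== PRECONDITION & SPEC =====
def Spec_generate_prefix_block (level : List (List Int)) (out : List (List Int × List Int)) : Prop := out = generate_prefix_block_alt level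
instance (level : List (List Int)) (out : List (List Int × List Int)) : Decidable (Spec_generate_prefix_block level out) := by unfold Spec_generate_prefix_block; infer_instance

-- ===== CLAIM (what is proved, stated in full; the proofs are below) =====
def Claim_equal_generate_prefix_block : Prop := ∀ (level : List (List Int)), Dom_generate_prefix_block level → Spec_generate_prefix_block level (generate_prefix_block level)

-- ===== LEMMAS AND PROOFS =====

lemma pyRange_one_nil {a b : Int} (h : b ≤ a) : PySem.List.pyRange a b = [] := by
  rw [PySem.List.pyRange_of_pos a b one_pos]
  simp [not_lt.mpr h]

lemma map_pyGetD_pyRange_drop (xs : List (List Int)) (k : Nat) :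
    ((PySem.List.pyRange (k : Int) ((xs.length : Nat) : Int)).map
      (fun j => PySem.List.pyGetD xs j [])) = xs.drop k := by
  obtain ⟨n, hn⟩ : ∃ n, xs.length ≤ k + n := ⟨xs.length, by omega⟩
  induction n generalizing k with
  | zero =>
    have hk : xs.length ≤ k := by omega
    rw [pyRange_one_nil (by exact_mod_cast hk), List.drop_eq_nil_of_le hk]
    rfl
  | succ n ih =>
    by_cases h : k < xs.length
    · have h' : (k : Int) < (xs.length : Int) := by exact_mod_cast h
      rw [PySem.List.pyRange_one_cons h', List.map_cons]
      have hc : ((k : Int) + 1) = ((k + 1 : Nat) : Int) := by push_cast; ring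
      rw [hc, ih (k + 1) (by omega), PySem.List.pyGetD_natCast,
        List.getD_eq_getElem xs [] h, List.drop_eq_getElem_cons h]
    · have hk : xs.length ≤ k := by omega
      rw [pyRange_one_nil (by exact_mod_cast hk), List.drop_eq_nil_of_le hk]
      rfl

-- the prefix key both programs compare (attr[0:-1] / attr[:-1])
def pvKey (xs : List Int) : List Int := PySem.List.slice xs none (some (-1))

lemma slice_zero_eq_key (xs : List Int) :
    PySem.List.slice xs (some 0) (some (-1)) = pvKey xs := by
  simp [PySem.List.slice, pvKey]

-- the pairs an entry `a` forms with the entries `t` occurring after it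
def pvPairs (a : List Int) (t : List (List Int)) : List (List Int × List Int) :=
  (t.filter (fun b => decide (a ≠ b ∧ pvKey a = pvKey b))).map (fun b => (a, b))

-- the common structural description of both programs
def pvCanon : List (List Int) → List (List Int × List Int)
  | [] => []
  | a :: t => pvPairs a t ++ pvCanon t

-- ---------- A = pvCanon ----------

lemma A_flatMap (level : List (List Int)) :
    generate_prefix_block level =
      (List.range level.length).flatMap (fun i =>
        pvPairs (level.getD i []) (level.drop (i + 1))) := by
  unfold generate_prefix_block
  have h1 : ∀ (i : Int) (acc : List (List Int × List Int)),
      (PySem.List.pyRange (i + 1) (PySem.List.len level)).foldl (fun acc j =>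
        let attr1 := PySem.List.pyGetD level i []
        let attr2 := PySem.List.pyGetD level j []
        if attr1 ≠ attr2 ∧ PySem.List.slice attr1 (some 0) (some (-1)) = PySem.List.slice attr2 (some 0) (some (-1))
        then acc ++ [(attr1, attr2)] else acc) acc
      = acc ++ ((PySem.List.pyRange (i + 1) (PySem.List.len level)).filter
          (fun j => decide (PySem.List.pyGetD level i [] ≠ PySem.List.pyGetD level j [] ∧
            pvKey (PySem.List.pyGetD level i []) = pvKey (PySem.List.pyGetD level j [])))).map
          (fun j => (PySem.List.pyGetD level i [], PySem.List.pyGetD level j [])) := by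
    intro i acc
    simp only [slice_zero_eq_key]
    exact PySem.List.foldl_append_ite _ _ _ _
  simp only [h1]
  rw [PySem.List.foldl_append_eq_flatMap, List.nil_append]
  have hlen : PySem.List.len level = ((level.length : Nat) : Int) := rfl
  rw [hlen, PySem.List.pyRange_zero_natCast, List.flatMap_map]
  have hfun : (fun i : Nat =>
      ((PySem.List.pyRange ((i : Int) + 1) ((level.length : Nat) : Int)).filter
          (fun j => decide (PySem.List.pyGetD level (i : Int) [] ≠ PySem.List.pyGetD level j [] ∧
            pvKey (PySem.List.pyGetD level (i : Int) []) = pvKey (PySem.List.pyGetD level j [])))).map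
          (fun j => (PySem.List.pyGetD level (i : Int) [], PySem.List.pyGetD level j [])))
      = (fun i => pvPairs (level.getD i []) (level.drop (i + 1))) := by
    funext i
    have hc : ((i : Int) + 1) = ((i + 1 : Nat) : Int) := by push_cast; ring
    rw [hc, ← map_pyGetD_pyRange_drop level (i + 1)]
    unfold pvPairs
    rw [List.filter_map, List.map_map]
    rw [PySem.List.pyGetD_natCast level i []]
    rfl
  rw [hfun]

lemma flatMap_range_eq_canon (level : List (List Int)) :
    (List.range level.length).flatMap (fun i =>
      pvPairs (level.getD i []) (level.drop (i + 1))) = pvCanon level := by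
  induction level with
  | nil => simp [pvCanon]
  | cons a t ih =>
    rw [List.length_cons, List.range_succ_eq_map, List.flatMap_cons, List.flatMap_map]
    have hfun : (fun i : Nat =>
        pvPairs ((a :: t).getD i.succ []) ((a :: t).drop (i.succ + 1)))
        = (fun i => pvPairs (t.getD i []) (t.drop (i + 1))) := by
      funext i
      rfl
    rw [hfun, ih]
    show pvPairs a t ++ pvCanon t = pvCanon (a :: t)
    rfl

-- ---------- B = pvCanon ----------

def pvStep (s : PySem.Dict (List Int) (List (List Int)) × List (List (List Int × List Int)))
    (attr : List Int) :
    PySem.Dict (List Int) (List (List Int)) × List (List (List Int × List Int)) :=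
  (s.1.insert (pvKey attr) (attr :: s.1.getD (pvKey attr) []),
   s.2 ++ [((s.1.getD (pvKey attr) []).filter (fun b => decide (b ≠ attr))).map (fun b => (attr, b))])

def pvState (t : List (List Int)) :
    PySem.Dict (List Int) (List (List Int)) × List (List (List Int × List Int)) :=
  t.foldr (fun x s => pvStep s x) (PySem.Dict.empty, [])

lemma alt_eq_state (level : List (List Int)) :
    generate_prefix_block_alt level = (pvState level).2.reverse.flatten := by
  unfold generate_prefix_block_alt pvState pvStep pvKey
  rw [List.foldl_reverse]

-- invariant of B's dict: the bucket at key k holds exactly the already-seen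
-- entries (= the suffix of `level` processed so far) whose prefix is k
lemma state_dict (t : List (List Int)) (k : List Int) :
    (pvState t).1.getD k [] = t.filter (fun b => decide (pvKey b = k)) := by
  induction t with
  | nil => simp [pvState, PySem.Dict.getD_empty]
  | cons a t ih =>
    show ((pvState t).1.insert (pvKey a) (a :: (pvState t).1.getD (pvKey a) [])).getD k [] = _
    rw [PySem.Dict.getD_insert, List.filter_cons]
    by_cases h : k = pvKey a
    · subst h
      simp [ih]
    · have h2 : ¬ (pvKey a = k) := fun hh => h hh.symm
      simp [h, h2, ih]

lemma state_blocks (t : List (List Int)) :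
    (pvState t).2.reverse.flatten = pvCanon t := by
  induction t with
  | nil => rfl
  | cons a t ih =>
    show ((pvState t).2 ++
        [(((pvState t).1.getD (pvKey a) []).filter (fun b => decide (b ≠ a))).map
          (fun b => (a, b))]).reverse.flatten = pvCanon (a :: t)
    rw [List.reverse_append, state_dict, List.filter_filter]
    have hp : ∀ b ∈ t, (decide (b ≠ a) && decide (pvKey b = pvKey a))
        = decide (a ≠ b ∧ pvKey a = pvKey b) := by
      intro b _
      rw [← Bool.decide_and, decide_eq_decide]
      exact ⟨fun ⟨x, y⟩ => ⟨Ne.symm x, y.symm⟩, fun ⟨x, y⟩ => ⟨Ne.symm x, y.symm⟩⟩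
    rw [List.filter_congr hp, List.reverse_singleton, List.singleton_append,
      List.flatten_cons, ih]
    rfl

-- ===== VERDICT (by name: the statement is the Claim_ definition above) =====
theorem generate_prefix_block_spec : Claim_equal_generate_prefix_block := by
  intro level _
  unfold Spec_generate_prefix_block
  rw [A_flatMap, flatMap_range_eq_canon, alt_eq_state, state_blocks]
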